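-- pv_equiv track=rewrite | github.com/chiralcentre/Kattis | tautology.py | solve
-- ===== SOURCE A (Python) =====
-- def solve(assignments, line):
--     for assign in assignments:
--         stack = []
--         for i in range(len(line) - 1, -1, -1):
--             if line[i] in assign:
--                 stack.append(assign[line[i]])
--             elif line[i] == "K":
--                 a,b = stack.pop(),stack.pop()
--                 stack.append(a and b)
--             elif line[i] == "A":
--                 a,b = stack.pop(),stack.pop()
--                 stack.append(a or b)
--             elif line[i] == "N":
--                 stack.append(not (stack.pop()))
--             elif line[i] == "C":
--                 a,b = stack.pop(),stack.pop()
--                 stack.append(not (a == False and b == True))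
--             elif line[i] == "E":
--                 a,b = stack.pop(),stack.pop()
--                 stack.append(a == b)
--         if stack[0] == False:
--             return "not"
--     return "tautology"
-- ===== SOURCE B (Python) =====
-- def solve(assignments, line):
--     OPS = "NKACE"
--     for assign in assignments:
--         tokens = [c for c in line if c in assign or c in OPS]
--         pos = 0
--         def parse():
--             nonlocal pos
--             t = tokens[pos]
--             pos += 1
--             if t in assign:
--                 return assign[t]
--             if t == "N":
--                 return not parse()
--             a = parse()
--             b = parse()
--             if t == "K":
--                 return a and b
--             if t == "A":
--                 return a or b
--             if t == "C":
--                 return not (a == False and b == True)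
--             return a == b
--         if not parse():
--             return "not"
--     return "tautology"
-- ===== Notes on version B (the rewrite author's own statement) =====
-- stated objective: alternative
-- what changed: Replaces A's right-to-left postfix-style stack machine with a left-to-right recursive-descent parser over the pre-filtered token list (shared cursor, one value per call, no stack).
-- outside the precondition, e.g. on solve([{'p': True, 'q': False}], 'pq'): A returns 'not', B returns 'tautology'
import Mathlib
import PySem

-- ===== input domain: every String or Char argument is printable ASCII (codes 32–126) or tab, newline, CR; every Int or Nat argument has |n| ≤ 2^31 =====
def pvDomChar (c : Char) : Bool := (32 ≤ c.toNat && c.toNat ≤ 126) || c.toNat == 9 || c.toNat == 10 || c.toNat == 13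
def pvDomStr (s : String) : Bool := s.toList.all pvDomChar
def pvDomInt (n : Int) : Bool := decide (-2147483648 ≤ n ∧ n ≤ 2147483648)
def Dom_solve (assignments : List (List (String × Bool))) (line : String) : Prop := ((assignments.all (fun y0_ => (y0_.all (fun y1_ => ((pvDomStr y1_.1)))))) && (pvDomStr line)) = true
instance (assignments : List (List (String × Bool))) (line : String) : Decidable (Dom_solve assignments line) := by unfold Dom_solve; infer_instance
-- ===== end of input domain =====

-- B replaces A's right-to-left stack evaluation by a left-to-right recursive-descent
-- parse of the token stream: a genuinely different traversal of the same formula.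


-- ===== PORT A =====
-- `line[i] in assign` / `assign[line[i]]`: first-match lookup of the one-char string
-- (shared by both ports: both Pythons classify characters identically).
def pvKey? (assign : List (String × Bool)) (c : Char) : Option Bool :=
  (assign.find? (fun p => p.1 = String.ofList [c])).map (·.2)

-- one step of A's inner loop; the Lean list holds the Python stack with its TOP
-- (Python end, where append/pop act) at the head, so Python's stack[0] is getLast?.
-- `none` models the IndexError of pop() on an empty stack.
def pvStepA (assign : List (String × Bool)) (st : List Bool) (c : Char) : Option (List Bool) :=
  match pvKey? assign c with
  | some v => some (v :: st)
  | none =>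
    if c = 'K' then
      match st with
      | a :: b :: rest => some ((a && b) :: rest)
      | _ => none
    else if c = 'A' then
      match st with
      | a :: b :: rest => some ((a || b) :: rest)
      | _ => none
    else if c = 'N' then
      match st with
      | a :: rest => some ((!a) :: rest)
      | _ => none
    else if c = 'C' then
      match st with
      | a :: b :: rest => some ((!(a == false && b == true)) :: rest)
      | _ => none
    else if c = 'E' then
      match st with
      | a :: b :: rest => some ((a == b) :: rest)
      | _ => none
    else some st

-- `for i in range(len(line)-1, -1, -1)`: fold over the reversed character list.
def pvEvalA (assign : List (String × Bool)) (cs : List Char) : Option (List Bool) :=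
  cs.foldl (fun o c => o.bind (fun st => pvStepA assign st c)) (some [])

def solve (assignments : List (List (String × Bool))) (line : String) : String :=
  match assignments with
  | [] => "tautology"
  | assign :: rest =>
    match pvEvalA assign line.toList.reverse with
    | some st =>
      match st.getLast? with                 -- stack[0]
      | some v => if v = false then "not" else solve rest line
      | none => ""                            -- IndexError: excluded by Pre_solve
    | none => ""                              -- IndexError: excluded by Pre_solve

-- ===== PORT B =====
-- token filter: `c in assign or c in "NKACE"`
def pvIsTok (assign : List (String × Bool)) (c : Char) : Bool :=
  (pvKey? assign c).isSome || c = 'N' || c = 'K' || c = 'A' || c = 'C' || c = 'E'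

-- Source B's recursive parse() with the shared cursor made explicit as the unconsumed
-- suffix; the fuel argument only bounds recursion depth (solve_alt passes
-- tokens.length + 1, which the recursion can never exhaust before the [] case);
-- `none` models the IndexError when tokens run out.
def pvParseB (assign : List (String × Bool)) : Nat → List Char → Option (Bool × List Char)
  | _, [] => none
  | 0, _ :: _ => none
  | n+1, t :: ts =>
    match pvKey? assign t with
    | some v => some (v, ts)
    | none =>
      if t = 'N' then
        match pvParseB assign n ts with
        | some (a, r) => some (!a, r)
        | none => none
      else
        match pvParseB assign n ts with
        | some (a, r1) =>
          match pvParseB assign n r1 with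
          | some (b, rest) =>
            if t = 'K' then some ((a && b), rest)
            else if t = 'A' then some ((a || b), rest)
            else if t = 'C' then some ((!(a == false && b == true)), rest)
            else some ((a == b), rest)
          | none => none
        | none => none

def solve_alt (assignments : List (List (String × Bool))) (line : String) : String :=
  match assignments with
  | [] => "tautology"
  | assign :: rest =>
    let tokens := line.toList.filter (pvIsTok assign)
    match pvParseB assign (tokens.length + 1) tokens with
    | some (v, _) => if v then solve_alt rest line else "not"
    | none => ""                              -- IndexError: excluded by Pre_solve

-- ===== PRECONDITION & SPEC =====
-- arity of a token: variable 0, N unary, K/A/C/E binary (non-tokens: none)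
def pvArity? (assign : List (String × Bool)) (c : Char) : Option Nat :=
  if (pvKey? assign c).isSome then some 0
  else if c = 'N' then some 1
  else if c = 'K' ∨ c = 'A' ∨ c = 'C' ∨ c = 'E' then some 2
  else none

-- needed-operand counter for prefix notation, scanned left to right
def pvCnt (assign : List (String × Bool)) : List Char → Nat → Option Nat
  | [], k => some k
  | c :: cs, k =>
    if k = 0 then none
    else match pvArity? assign c with
      | some a => pvCnt assign cs (k - 1 + a)
      | none => none

-- Pre_ excludes malformed lines whose token stream is not exactly one complete
-- prefix formula for some assignment: there A either raises IndexError or returns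
-- a value read from leftover stack slots, an accident of its evaluation order.
def Pre_solve (assignments : List (List (String × Bool))) (line : String) : Prop :=
  ∀ assign ∈ assignments, pvCnt assign (line.toList.filter (pvIsTok assign)) 1 = some 0
instance (assignments : List (List (String × Bool))) (line : String) : Decidable (Pre_solve assignments line) := by unfold Pre_solve; infer_instance

def pvWitness_solve : (List (List (String × Bool))) × String := ([[("p", true)], [("p", false)]], "CpNp")

def Spec_solve (assignments : List (List (String × Bool))) (line : String) (out : String) : Prop := out = solve_alt assignments line
instance (assignments : List (List (String × Bool))) (line : String) (out : String) : Decidable (Spec_solve assignments line out) := by unfold Spec_solve; infer_instance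

-- ===== CLAIM (what is proved, stated in full; the proofs are below) =====
def Claim_equal_solve : Prop := ∀ (assignments : List (List (String × Bool))) (line : String), Dom_solve assignments line → Pre_solve assignments line → Spec_solve assignments line (solve assignments line)

-- ===== LEMMAS AND PROOFS =====

-- characters A skips (not a key, not an operator) leave A's state unchanged
theorem pvStepA_skip (assign : List (String × Bool)) (c : Char)
    (h : pvIsTok assign c = false) (o : Option (List Bool)) :
    o.bind (fun st => pvStepA assign st c) = o := by
  simp only [pvIsTok, Bool.or_eq_false_iff, decide_eq_false_iff_not,
    Option.isSome_eq_false_iff, Option.isNone_iff_eq_none] at h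
  obtain ⟨⟨⟨⟨⟨hk, hN⟩, hK⟩, hA⟩, hC⟩, hE⟩ := h
  cases o with
  | none => rfl
  | some st => simp [pvStepA, hk, hN, hK, hA, hC, hE]

-- folding A's step over a list equals folding it over the kept tokens only
theorem pvFold_filter (assign : List (String × Bool)) (cs : List Char)
    (o : Option (List Bool)) :
    List.foldl (fun o c => o.bind (fun st => pvStepA assign st c)) o cs
      = List.foldl (fun o c => o.bind (fun st => pvStepA assign st c)) o
          (cs.filter (pvIsTok assign)) := by
  induction cs generalizing o with
  | nil => rfl
  | cons c cs ih =>
    by_cases h : pvIsTok assign c = true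
    · simp [h, ih]
    · simp only [Bool.not_eq_true] at h
      simp [h, pvStepA_skip assign c h, ih]

-- MAIN LEMMA: on a token stream needing k+1 operands (counter check), B's parser
-- consumes one complete formula `pre` returning v, the remainder needs k, and
-- A's stack machine run over `pre` reversed pushes exactly v.
theorem pvP (assign : List (String × Bool)) :
    ∀ (n : Nat) (cs : List Char) (k : Nat),
    (∀ c ∈ cs, pvIsTok assign c = true) →
    pvCnt assign cs (k+1) = some 0 →
    cs.length ≤ n →
    ∃ (v : Bool) (pre rest : List Char), cs = pre ++ rest ∧
      pvParseB assign n cs = some (v, rest) ∧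
      pvCnt assign rest k = some 0 ∧
      ∀ st : List Bool,
        List.foldl (fun o c => o.bind (fun s => pvStepA assign s c)) (some st) pre.reverse
          = some (v :: st) := by
  intro n
  induction n with
  | zero =>
    intro cs k _ hcnt hlen
    interval_cases hc : cs.length
    · rw [List.length_eq_zero_iff.mp hc] at hcnt
      simp [pvCnt] at hcnt
  | succ n ih =>
    intro cs k htok hcnt hlen
    cases cs with
    | nil => simp [pvCnt] at hcnt
    | cons c cs' =>
      have htokc : pvIsTok assign c = true := htok c (by simp)
      have htok' : ∀ x ∈ cs', pvIsTok assign x = true := fun x hx => htok x (by simp [hx])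
      rw [pvCnt] at hcnt
      simp only [Nat.succ_ne_zero, if_false] at hcnt
      rcases hkey : pvKey? assign c with _ | v
      · -- operator
        have hnotvar : (pvKey? assign c).isSome = false := by simp [hkey]
        by_cases hN : c = 'N'
        · -- unary
          subst hN
          rw [pvArity?] at hcnt
          simp only [hnotvar, Bool.false_eq_true, if_false] at hcnt
          have hcnt' : pvCnt assign cs' (k+1) = some 0 := by simpa using hcnt
          obtain ⟨a, pre1, rest, hsplit, hparse, hrest, hfold⟩ :=
            ih cs' k htok' hcnt' (by simpa using Nat.le_of_succ_le_succ hlen)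
          refine ⟨!a, 'N' :: pre1, rest, by simp [hsplit], ?_, hrest, ?_⟩
          · rw [pvParseB]
            simp [hkey, hparse]
          · intro st
            simp only [List.reverse_cons, List.foldl_append, hfold, List.foldl_cons,
              List.foldl_nil, Option.bind_some]
            simp [pvStepA, hkey]
        · -- binary
          have hbin : c = 'K' ∨ c = 'A' ∨ c = 'C' ∨ c = 'E' := by
            simp only [pvIsTok, hnotvar, Bool.false_or, Bool.or_eq_true,
              decide_eq_true_eq] at htokc
            tauto
          rw [pvArity?] at hcnt
          simp only [hnotvar, Bool.false_eq_true, if_false, if_neg hN,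
            if_pos hbin] at hcnt
          have hcnt' : pvCnt assign cs' (k+2) = some 0 := by
            have : k + 1 - 1 + 2 = (k + 1) + 1 := by omega
            rw [this] at hcnt; exact hcnt
          obtain ⟨a, pre1, r1, hsplit1, hparse1, hr1, hfold1⟩ :=
            ih cs' (k+1) htok' hcnt' (by simpa using Nat.le_of_succ_le_succ hlen)
          have htokr1 : ∀ x ∈ r1, pvIsTok assign x = true := by
            intro x hx; exact htok' x (by simp [hsplit1, hx])
          have hlenr1 : r1.length ≤ n := by
            have : pre1.length + r1.length = cs'.length := by
              rw [hsplit1]; simp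
            have hl : cs'.length ≤ n := by simpa using Nat.le_of_succ_le_succ hlen
            omega
          obtain ⟨b, pre2, rest, hsplit2, hparse2, hrest, hfold2⟩ :=
            ih r1 k htokr1 hr1 hlenr1
          refine ⟨if c = 'K' then (a && b) else if c = 'A' then (a || b)
                  else if c = 'C' then (!(a == false && b == true)) else (a == b),
                  c :: (pre1 ++ pre2), rest, by simp [hsplit1, hsplit2], ?_, hrest, ?_⟩
          · rw [pvParseB]
            simp only [hkey, if_neg hN, hparse1, hparse2]
            split_ifs <;> rfl
          · intro st
            simp only [List.reverse_cons, List.reverse_append, List.foldl_append,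
              hfold2, hfold1, List.foldl_cons, List.foldl_nil, Option.bind_some]
            rcases hbin with h | h | h | h <;>
              (subst h; simp [pvStepA, hkey])
      · -- variable
        rw [pvArity?] at hcnt
        simp only [hkey, Option.isSome_some, if_true] at hcnt
        have hcnt' : pvCnt assign cs' k = some 0 := by simpa using hcnt
        refine ⟨v, [c], cs', by simp, ?_, hcnt', ?_⟩
        · rw [pvParseB]; simp [hkey]
        · intro st
          simp [pvStepA, hkey]

-- one assignment: A's inner loop leaves exactly [v] and B's parse returns v
theorem pvAssign (assign : List (String × Bool)) (line : String)
    (h : pvCnt assign (line.toList.filter (pvIsTok assign)) 1 = some 0) :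
    ∃ v : Bool, pvEvalA assign line.toList.reverse = some [v] ∧
      pvParseB assign ((line.toList.filter (pvIsTok assign)).length + 1)
        (line.toList.filter (pvIsTok assign)) = some (v, []) := by
  set toks := line.toList.filter (pvIsTok assign) with htoks
  obtain ⟨v, pre, rest, hsplit, hparse, hrest, hfold⟩ :=
    pvP assign (toks.length + 1) toks 0
      (fun c hc => (List.mem_filter.mp hc).2) h (by omega)
  have hrnil : rest = [] := by
    cases rest with
    | nil => rfl
    | cons x xs => simp [pvCnt] at hrest
  subst hrnil
  rw [List.append_nil] at hsplit
  refine ⟨v, ?_, hparse⟩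
  rw [pvEvalA, pvFold_filter, List.filter_reverse, ← htoks]
  have hf := hfold []
  rw [← hsplit] at hf
  exact hf

theorem pv_main : ∀ (assignments : List (List (String × Bool))) (line : String),
    Pre_solve assignments line → solve assignments line = solve_alt assignments line := by
  intro assignments line hpre
  induction assignments with
  | nil => rfl
  | cons assign rest ih =>
    have hhead := hpre assign (by simp)
    have htail : Pre_solve rest line := fun a ha => hpre a (by simp [ha])
    obtain ⟨v, hA, hB⟩ := pvAssign assign line hhead
    rw [solve, solve_alt]
    simp only [hA, hB, List.getLast?_singleton]
    cases v with
    | false => simp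
    | true => simpa using ih htail

-- ===== VERDICT (by name: the statement is the Claim_ definition above) =====
theorem solve_spec : Claim_equal_solve := by
  intro assignments line _ hpre
  show solve assignments line = solve_alt assignments line
  exact pv_main assignments line hpre
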